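-- pv_equiv track=rewrite | github.com/Spicyblue/Launch_School | PY_101/Lesson_3/Easy_1/question04.py | capitalize_only_first_word
-- ===== SOURCE A (Python) =====
-- def capitalize_only_first_word(word_input):
--     final_word = ''
--     index = 0
--
--     while index < len(word_input):
--         if index == 0:
--             final_word += word_input[index].upper()
--         else:
--             final_word += word_input[index].lower()
--
--         index += 1
--
--     return final_word
-- ===== SOURCE B (Python) =====
-- def capitalize_only_first_word(word_input):
--     return word_input[:1].upper() + word_input[1:].lower()
-- ===== Notes on version B (the rewrite author's own statement) =====
-- stated objective: faster
-- what changed: Replaces the indexed while-loop with per-position branching and repeated string concatenation by two slice operations: uppercase the one-character head slice and concatenate the lowercased tail slice.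
import Mathlib
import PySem

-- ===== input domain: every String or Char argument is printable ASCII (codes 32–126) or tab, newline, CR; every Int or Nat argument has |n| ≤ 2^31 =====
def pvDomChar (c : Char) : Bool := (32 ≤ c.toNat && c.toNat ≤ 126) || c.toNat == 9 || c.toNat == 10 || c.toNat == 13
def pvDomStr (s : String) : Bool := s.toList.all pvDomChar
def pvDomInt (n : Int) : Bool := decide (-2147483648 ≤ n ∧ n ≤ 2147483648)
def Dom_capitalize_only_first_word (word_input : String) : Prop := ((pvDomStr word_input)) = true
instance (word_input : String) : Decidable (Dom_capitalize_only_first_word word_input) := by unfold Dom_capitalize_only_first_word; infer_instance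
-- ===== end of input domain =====

-- B replaces A's indexed while-loop (quadratic repeated concatenation) with slice construction: uppercase the head slice, concatenate the lowercased tail slice.


-- ===== PORT A =====
-- the while-loop: index scans the string, appending the uppercased char at index 0 and the lowercased char elsewhere
def capA_go (cs : List Char) (index : Nat) (acc : List Char) : List Char :=
  if h : index < cs.length then
    let acc' := if index == 0 then acc ++ [PySem.Chars.upperChar cs[index]]
                else acc ++ [PySem.Chars.lowerChar cs[index]]
    capA_go cs (index + 1) acc'
  else acc
termination_by cs.length - index

def capitalize_only_first_word (word_input : String) : String :=
  String.ofList (capA_go word_input.toList 0 [])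

-- ===== PORT B =====
def capitalize_only_first_word_alt (word_input : String) : String :=
  PySem.Str.upper (PySem.Str.slice word_input none (some 1))
    ++ PySem.Str.lower (PySem.Str.slice word_input (some 1) none)

-- ===== PRECONDITION & SPEC =====
def Spec_capitalize_only_first_word (word_input : String) (out : String) : Prop := out = capitalize_only_first_word_alt word_input
instance (word_input : String) (out : String) : Decidable (Spec_capitalize_only_first_word word_input out) := by unfold Spec_capitalize_only_first_word; infer_instance

-- ===== CLAIM (what is proved, stated in full; the proofs are below) =====
def Claim_equal_capitalize_only_first_word : Prop := ∀ (word_input : String), Dom_capitalize_only_first_word word_input → Spec_capitalize_only_first_word word_input (capitalize_only_first_word word_input)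

-- ===== LEMMAS AND PROOFS =====
-- once past index 0, the loop appends the lowercased remainder of the string
theorem capA_go_pos (cs : List Char) (index : Nat) (acc : List Char) (hpos : 0 < index) :
    capA_go cs index acc = acc ++ (cs.drop index).map PySem.Chars.lowerChar := by
  by_cases h : index < cs.length
  · rw [capA_go]
    simp only [h, dif_pos, beq_iff_eq, Nat.pos_iff_ne_zero.mp hpos, if_false]
    rw [capA_go_pos cs (index + 1) _ (by omega)]
    rw [List.append_assoc]
    congr 1
    rw [List.drop_eq_getElem_cons h, List.map_cons, List.singleton_append]
  · rw [capA_go]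
    simp only [h, dif_neg, not_false_iff]
    rw [List.drop_eq_nil_of_le (by omega)]
    simp
termination_by cs.length - index

theorem capA_go_zero (cs : List Char) :
    capA_go cs 0 [] = (cs.take 1).map PySem.Chars.upperChar ++ (cs.drop 1).map PySem.Chars.lowerChar := by
  cases cs with
  | nil => rw [capA_go]; simp
  | cons c rest =>
    rw [capA_go]
    simp only [List.length_cons, Nat.succ_pos, dif_pos]
    rw [capA_go_pos _ 1 _ (by omega)]
    simp

-- ===== VERDICT (by name: the statement is the Claim_ definition above) =====
theorem capitalize_only_first_word_spec : Claim_equal_capitalize_only_first_word := by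
  intro w _
  unfold Spec_capitalize_only_first_word capitalize_only_first_word capitalize_only_first_word_alt
  apply String.toList_injective
  simp only [String.toList_ofList, String.toList_append, PySem.Str.toList_upper, PySem.Str.toList_lower,
    PySem.Str.toList_slice, PySem.Chars.slice_eq_listSlice, PySem.Chars.upper, PySem.Chars.lower]
  rw [show ((1 : Int) = ((1 : Nat) : Int)) from rfl, PySem.List.slice_to_natCast,
    PySem.List.slice_from_natCast]
  exact capA_go_zero w.toList
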